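-- pv_equiv track=rewrite | github.com/fini4eggg/sep_fio | robot.py | do_command
-- ===== SOURCE A (Python) =====
-- def do_command(text):
--     # words = text.lower
--     words = text.split()
--     strr = ''
--     i = 0
--     for word in words:
--         while i < len(words):
--             if i == 0:
--                 strr += word[0].upper() + word[1:].lower() + ' '
--                 i += 1
--             else:
--                 strr += word[0].upper() + '. '
--                 i += 1
--
--
--     return strr
-- ===== SOURCE B (Python) =====
-- def do_command(text):
--     words = text.split()
--     if not words:
--         return ''
--     first = words[0]
--     return first[0].upper() + first[1:].lower() + ' ' + (first[0].upper() + '. ') * (len(words) - 1)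
-- ===== Notes on version B (the rewrite author's own statement) =====
-- stated objective: simpler
-- what changed: Replaced A's nested for/while (whose inner while consumes the whole counter on the first word, so only words[0] is ever formatted) by a single closed-form expression: format the first word once and append (len(words)-1) copies of its abbreviated initial via string repetition.
import Mathlib
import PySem

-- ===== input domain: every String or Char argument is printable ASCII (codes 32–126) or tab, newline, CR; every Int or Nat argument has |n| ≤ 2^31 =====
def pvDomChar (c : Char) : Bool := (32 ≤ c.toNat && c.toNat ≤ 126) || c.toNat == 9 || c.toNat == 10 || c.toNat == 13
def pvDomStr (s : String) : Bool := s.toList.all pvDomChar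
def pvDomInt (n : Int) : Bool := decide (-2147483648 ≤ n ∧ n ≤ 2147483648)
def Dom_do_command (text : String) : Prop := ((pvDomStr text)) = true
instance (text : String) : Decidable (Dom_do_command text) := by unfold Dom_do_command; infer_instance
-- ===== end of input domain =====

-- B replaces A's nested for/while (which only ever formats words[0]) by one closed-form
-- expression with a string repetition; objective: simpler.

-- ===== PORT A =====
-- inner 'while i < len(words)' loop; state (strr, i); the 'none' branch is Python's
-- IndexError on word[0] (unreachable: split() never yields an empty word)
def pvAWhile (word : List Char) (n i : Nat) (strr : List Char) : List Char × Nat :=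
  if i < n then
    match PySem.List.pyGet? word 0 with
    | none => (strr, i)
    | some c =>
      if i = 0 then
        pvAWhile word n (i + 1)
          (strr ++ [PySem.Chars.upperChar c] ++ PySem.Chars.lower (PySem.List.slice word (some 1) none) ++ [' '])
      else
        pvAWhile word n (i + 1) (strr ++ [PySem.Chars.upperChar c] ++ ['.', ' '])
  else (strr, i)
termination_by n - i
decreasing_by all_goals omega

def do_command (text : String) : String :=
  let words := PySem.Chars.split₀ text.toList
  let st := words.foldl (fun st word => pvAWhile word words.length st.2 st.1) ([], 0)
  String.ofList st.1

-- ===== PORT B =====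
-- closed form: first word capitalized, then (len(words)-1) copies of first[0].upper()+'. '
-- (the [] inner branch is Python's IndexError on first[0], unreachable for split() output)
def do_command_alt (text : String) : String :=
  match PySem.Chars.split₀ text.toList with
  | [] => String.ofList []
  | first :: rest =>
    match first with
    | [] => String.ofList []
    | c :: t =>
      String.ofList ([PySem.Chars.upperChar c] ++ PySem.Chars.lower t ++ [' ']
        ++ PySem.List.pyRepeat ([PySem.Chars.upperChar c] ++ ['.', ' ']) (rest.length))

-- ===== PRECONDITION & SPEC =====
def Spec_do_command (text : String) (out : String) : Prop := out = do_command_alt text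
instance (text : String) (out : String) : Decidable (Spec_do_command text out) := by unfold Spec_do_command; infer_instance

-- ===== CLAIM (what is proved, stated in full; the proofs are below) =====
def Claim_equal_do_command : Prop := ∀ (text : String), Dom_do_command text → Spec_do_command text (do_command text)

-- ===== LEMMAS AND PROOFS =====

-- split() never produces an empty word
theorem pv_split₀_go_ne_nil (s cur : List Char) (acc : List (List Char))
    (hacc : ∀ w ∈ acc, w ≠ []) :
    ∀ w ∈ PySem.Chars.split₀.go s cur acc, w ≠ [] := by
  induction s generalizing cur acc with
  | nil =>
    intro w hw
    unfold PySem.Chars.split₀.go at hw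
    split_ifs at hw with h
    · exact hacc w (List.mem_reverse.mp hw)
    · rcases List.mem_cons.mp (List.mem_reverse.mp hw) with h1 | h1
      · simp only [h1]
        simpa [List.isEmpty_iff] using h
      · exact hacc w h1
  | cons c rest ih =>
    intro w hw
    unfold PySem.Chars.split₀.go at hw
    split_ifs at hw with h1 h2
    · exact ih [] acc hacc w hw
    · refine ih [] (cur.reverse :: acc) ?_ w hw
      intro x hx
      rcases List.mem_cons.mp hx with rfl | hx
      · simpa [List.isEmpty_iff] using h2
      · exact hacc x hx
    · exact ih (c :: cur) acc hacc w hw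

theorem pv_split₀_ne_nil (s : List Char) :
    ∀ w ∈ PySem.Chars.split₀ s, w ≠ [] :=
  pv_split₀_go_ne_nil s [] [] (by simp)

-- the while loop with i ≥ 1 appends one abbreviation piece per remaining step
theorem pvAWhile_aux (c : Char) (t : List Char) (m : Nat) :
    ∀ (i : Nat) (strr : List Char), 1 ≤ i →
      pvAWhile (c :: t) (i + m) i strr
        = (strr ++ (List.replicate m ([PySem.Chars.upperChar c] ++ ['.', ' '])).flatten, i + m) := by
  induction m with
  | zero =>
    intro i strr hi
    unfold pvAWhile
    simp
  | succ m ih =>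
    intro i strr hi
    unfold pvAWhile
    have h1 : i < i + (m + 1) := by omega
    have h2 : i ≠ 0 := by omega
    simp only [h1, if_pos, h2, PySem.List.pyGet?, PySem.List.pyIdx?]
    norm_num
    have h3 := ih (i + 1) (strr ++ [PySem.Chars.upperChar c, '.', ' ']) (by omega)
    rw [show i + (m + 1) = (i + 1) + m by omega, h3]
    simp [List.replicate_succ]

-- the while loop starting at i = 0 (first word): capitalize, then n-1 abbreviations
theorem pvAWhile_first (c : Char) (t : List Char) (m : Nat) :
    pvAWhile (c :: t) (m + 1) 0 []
      = ([PySem.Chars.upperChar c] ++ PySem.Chars.lower t ++ [' ']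
          ++ (List.replicate m ([PySem.Chars.upperChar c] ++ ['.', ' '])).flatten, m + 1) := by
  unfold pvAWhile
  have h1 : 0 < m + 1 := by omega
  simp only [h1, if_pos, PySem.List.pyGet?, PySem.List.pyIdx?]
  norm_num
  rw [show m + 1 = 1 + m by omega, pvAWhile_aux c t m 1 _ (by omega)]
  simp [PySem.List.slice_from_one]

-- the fold over the remaining words with i = n is the identity
theorem pv_fold_done (ws : List (List Char)) (n : Nat) (strr : List Char) :
    ws.foldl (fun st word => pvAWhile word n st.2 st.1) (strr, n) = (strr, n) := by
  induction ws with
  | nil => rfl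
  | cons w ws ih =>
    have h : pvAWhile w n n strr = (strr, n) := by
      unfold pvAWhile; simp
    simp [List.foldl, h, ih]

-- ===== VERDICT (by name: the statement is the Claim_ definition above) =====
theorem do_command_spec : Claim_equal_do_command := by
  intro text _
  unfold Spec_do_command do_command do_command_alt
  cases hw : PySem.Chars.split₀ text.toList with
  | nil => simp
  | cons first rest =>
    have hne : first ≠ [] := pv_split₀_ne_nil text.toList first (hw ▸ List.mem_cons_self)
    cases first with
    | nil => exact absurd rfl hne
    | cons c t =>
      simp only [List.foldl, List.length_cons]
      rw [pvAWhile_first c t rest.length, pv_fold_done]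
      simp [PySem.List.pyRepeat]
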